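-- pv_equiv track=rewrite | github.com/CornerMercury/Hugequiz-solver | generic_solver.py | build_prefix_map
-- ===== SOURCE A (Python) =====
-- from collections import defaultdict
--
-- def build_prefix_map(names):
--     """
--     For every name find all (strict) prefixes that are themselves
--     valid city names.
--     """
--     name_set = set(names)
--     prefix_of = defaultdict(set)
--
--     for n in names:
--         for k in range(1, len(n)):
--             p = n[:k]
--             if p in name_set:
--                 prefix_of[n].add(p)
--     return prefix_of
-- ===== SOURCE B (Python) =====
-- def build_prefix_map(names):
--     """
--     For every name find all (strict) prefixes that are themselves
--     valid city names.
--     """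
--     # Strict prefixes start at length 1, so the empty name is never a prefix
--     # (and has no prefixes itself): drop it from the candidate pool.
--     uniq = sorted(n for n in set(names) if n)
--     chains = {}
--     stack = []  # chain of already-seen names, each a prefix of the next
--     for w in uniq:
--         while stack and not w.startswith(stack[-1]):
--             stack.pop()
--         if stack:
--             chains[w] = set(stack)
--         stack.append(w)
--     result = {}
--     for n in names:  # restore first-occurrence key order
--         if n in chains:
--             result[n] = chains[n]
--     return result
-- ===== Notes on version B (the rewrite author's own statement) =====
-- stated objective: alternative
-- what changed: Replaces the per-name scan over all O(L) sliced prefixes with set membership tests by sorting the distinct names once and sweeping them with a stack of the current prefix chain, so each name's valid prefixes are read off the stack; a final pass over names restores first-occurrence key order.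
import Mathlib
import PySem

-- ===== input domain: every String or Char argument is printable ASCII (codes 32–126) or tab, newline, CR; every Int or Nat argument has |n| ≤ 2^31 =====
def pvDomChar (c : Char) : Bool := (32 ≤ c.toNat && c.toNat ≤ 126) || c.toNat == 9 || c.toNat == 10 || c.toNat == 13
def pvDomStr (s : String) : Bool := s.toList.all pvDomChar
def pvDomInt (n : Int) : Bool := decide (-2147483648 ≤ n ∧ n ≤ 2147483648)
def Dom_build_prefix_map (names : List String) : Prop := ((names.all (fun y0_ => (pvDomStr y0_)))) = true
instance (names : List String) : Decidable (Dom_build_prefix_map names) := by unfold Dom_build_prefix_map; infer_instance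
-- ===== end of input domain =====

-- B replaces A's per-name scan over all sliced prefixes (membership in a set) by one sort of the
-- distinct names and a prefix-chain stack sweep, restoring key order with a final pass (objective: alternative).


-- ===== PORT A =====
def build_prefix_map (names : List String) : List (String × List String) :=
  let nameSet : PySem.Set String := PySem.Set.ofList names
  let prefixOf : PySem.Dict String (PySem.Set String) :=
    names.foldl (fun d n =>
      (PySem.List.pyRange 1 (PySem.Str.len n)).foldl (fun d k =>
        let p := PySem.Str.slice n none (some k)
        if PySem.Set.contains nameSet p then
          d.modify n PySem.Set.empty (fun s => PySem.Set.add s p)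
        else d) d) PySem.Dict.empty
  prefixOf.items

-- ===== PORT B =====
-- the 'while stack and not w.startswith(stack[-1]): stack.pop()' loop of Source B
def pvPopWhile (w : String) (stack : List String) : List String :=
  match hl : stack.getLast? with
  | none => stack
  | some top =>
    if PySem.Str.startswith w top then stack
    else pvPopWhile w stack.dropLast
termination_by stack.length
decreasing_by
  have hne : stack ≠ [] := by intro e; subst e; simp at hl
  cases stack with
  | nil => exact absurd rfl hne
  | cons x rest => simp

def build_prefix_map_alt (names : List String) : List (String × List String) :=
  let uniq := PySem.List.sorted ((PySem.Set.ofList names).filter (fun n => !(n == ""))) (fun x => x) false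
  let final : PySem.Dict String (PySem.Set String) × List String :=
    uniq.foldl (fun st w =>
      let stack := pvPopWhile w st.2
      let chains := if stack.isEmpty then st.1 else st.1.insert w (PySem.Set.ofList stack)
      (chains, stack ++ [w])) (PySem.Dict.empty, [])
  let chains := final.1
  let result : PySem.Dict String (PySem.Set String) :=
    names.foldl (fun r n =>
      match chains.get? n with
      | some v => r.insert n v
      | none => r) PySem.Dict.empty
  result.items

-- ===== PRECONDITION & SPEC =====
def Spec_build_prefix_map (names : List String) (out : List (String × List String)) : Prop := out = build_prefix_map_alt names
instance (names : List String) (out : List (String × List String)) : Decidable (Spec_build_prefix_map names out) := by unfold Spec_build_prefix_map; infer_instance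

-- ===== CLAIM (what is proved, stated in full; the proofs are below) =====
def Claim_equal_build_prefix_map : Prop := ∀ (names : List String), Dom_build_prefix_map names → Spec_build_prefix_map names (build_prefix_map names)

-- ===== LEMMAS AND PROOFS =====

abbrev PVDict := PySem.Dict String (PySem.Set String)

-- A's per-name value: the sliced strict prefixes (in increasing k) that are names
def pvAVal (names : List String) (n : String) : List String :=
  ((PySem.List.pyRange 1 (PySem.Str.len n)).map (fun k => PySem.Str.slice n none (some k))).filter
    (fun p => PySem.Set.contains (PySem.Set.ofList names) p)

-- B's sorted distinct nonempty names
def pvU (names : List String) : List String :=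
  PySem.List.sorted ((PySem.Set.ofList names).filter (fun n => !(n == ""))) (fun x => x) false

-- elements of u that are strict prefixes of w / prefixes (incl. w)
def pvChainLt (u : List String) (w : String) : List String :=
  u.filter (fun p => PySem.Str.startswith w p && !(p == w))
def pvChainLe (u : List String) (w : String) : List String :=
  u.filter (fun p => PySem.Str.startswith w p)

def pvStackOf (u : List String) (pre : List String) : List String :=
  match pre.getLast? with
  | none => []
  | some w0 => pvChainLe u w0

def pvStepA (names : List String) (d : PVDict) (n : String) : PVDict :=
  (PySem.List.pyRange 1 (PySem.Str.len n)).foldl (fun d k =>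
    if PySem.Set.contains (PySem.Set.ofList names) (PySem.Str.slice n none (some k)) then
      d.insert n (PySem.Set.add (d.getD n PySem.Set.empty) (PySem.Str.slice n none (some k)))
    else d) d

def pvStepS (st : PVDict × List String) (w : String) : PVDict × List String :=
  let stack := pvPopWhile w st.2
  let chains := if stack.isEmpty then st.1 else st.1.insert w (PySem.Set.ofList stack)
  (chains, stack ++ [w])

def pvStepB (ch : PVDict) (r : PVDict) (n : String) : PVDict :=
  match ch.get? n with
  | some v => r.insert n v
  | none => r

-- ---------- order / prefix facts ----------

theorem pvLexL (p n : List Char) (h : p <+: n) (hne : p ≠ n) : List.Lex (·<·) p n := by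
  induction p generalizing n with
  | nil =>
    cases n with
    | nil => exact absurd rfl hne
    | cons b m => exact List.Lex.nil
  | cons a p' ih =>
    cases n with
    | nil => simp at h
    | cons b m =>
      rw [List.cons_prefix_cons] at h
      obtain ⟨rfl, h2⟩ := h
      exact List.Lex.cons (ih m h2 (by intro e; exact hne (by rw [e])))

theorem pvLex_of_prefix_ne (p n : String) (h : p.toList <+: n.toList) (hne : p ≠ n) : p < n := by
  rw [String.lt_iff_toList_lt]
  exact pvLexL _ _ h (fun e => hne (String.toList_inj.mp e))

theorem pvLe_of_prefix (p n : String) (h : p.toList <+: n.toList) : p ≤ n := by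
  by_cases he : p = n
  · exact le_of_eq he
  · exact le_of_lt (pvLex_of_prefix_ne p n h he)

theorem pvSandwichL (p w n : List Char) (hpn : p <+: n)
    (hpw : List.Lex (·<·) p w ∨ p = w) (hwn : List.Lex (·<·) w n ∨ w = n) : p <+: w := by
  induction p generalizing w n with
  | nil => exact List.nil_prefix
  | cons a p' ih =>
    rcases hpw with hpw | rfl
    · cases n with
      | nil => simp at hpn
      | cons b m =>
        rw [List.cons_prefix_cons] at hpn
        obtain ⟨rfl, hpn'⟩ := hpn
        cases hpw with
        | @rel _ _ b' w' hab =>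
          -- w = b' :: w' with a < b'; but w ≤ n = a :: m forces b' ≤ a: contradiction
          rcases hwn with hwn | he
          · cases hwn with
            | rel h' => exact absurd (lt_trans hab h') (lt_irrefl a)
            | cons h' => exact absurd hab (lt_irrefl a)
          · have : b' = a := by injection he
            exact absurd (this ▸ hab) (lt_irrefl a)
        | @cons _ _ w' hlex =>
          -- w = a :: w', Lex p' w'
          rcases hwn with hwn | he
          · cases hwn with
            | rel h' => exact absurd h' (lt_irrefl a)
            | cons h' =>
              rw [List.cons_prefix_cons]
              exact ⟨rfl, ih w' m hpn' (Or.inl hlex) (Or.inl h')⟩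
          · rw [List.cons_prefix_cons]
            have : w' = m := by injection he
            exact ⟨rfl, ih w' m hpn' (Or.inl hlex) (Or.inr this)⟩
    · exact List.prefix_refl _

theorem pvSandwich (p w n : String) (hpn : p.toList <+: n.toList) (h1 : p ≤ w) (h2 : w ≤ n) :
    p.toList <+: w.toList := by
  apply pvSandwichL p.toList w.toList n.toList hpn
  · rcases lt_or_eq_of_le h1 with h | h
    · exact Or.inl (String.lt_iff_toList_lt.mp h)
    · exact Or.inr (congrArg String.toList h)
  · rcases lt_or_eq_of_le h2 with h | h
    · exact Or.inl (String.lt_iff_toList_lt.mp h)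
    · exact Or.inr (congrArg String.toList h)

theorem pvPrefix_anti (p q w : String) (hp : p.toList <+: w.toList) (hq : q.toList <+: w.toList)
    (hlt : p < q) : p.toList <+: q.toList := by
  rcases List.prefix_or_prefix_of_prefix hp hq with h | h
  · exact h
  · exact absurd hlt (not_lt_of_ge (pvLe_of_prefix q p h))

theorem pvSW_iff (w p : String) : PySem.Str.startswith w p = true ↔ p.toList <+: w.toList := by
  rw [PySem.Str.startswith_eq]; exact PySem.Chars.startswith_iff _ _

-- ---------- pvU facts ----------

theorem pvU_nodup (names : List String) : (pvU names).Nodup := by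
  have hperm := PySem.List.sorted_perm ((PySem.Set.ofList names).filter (fun n => !(n == ""))) (fun x => x) false
  exact hperm.nodup_iff.mpr ((PySem.Set.nodup_ofList names).filter _)

theorem pvU_pairwise (names : List String) : List.Pairwise (· < ·) (pvU names) := by
  have h1 : List.Pairwise (· ≤ ·) (pvU names) :=
    PySem.List.sorted_pairwise ((PySem.Set.ofList names).filter (fun n => !(n == ""))) (fun x => x)
  have h2 : List.Pairwise (· ≠ ·) (pvU names) := pvU_nodup names
  exact (h1.and h2).imp (fun h => lt_of_le_of_ne h.1 h.2)

theorem pvU_mem (names : List String) (w : String) : w ∈ pvU names ↔ w ∈ names ∧ w ≠ "" := by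
  have hperm := PySem.List.sorted_perm ((PySem.Set.ofList names).filter (fun n => !(n == ""))) (fun x => x) false
  rw [pvU, hperm.mem_iff, List.mem_filter, PySem.Set.mem_ofList]
  simp

-- ---------- Set facts ----------

theorem pvSet_add_mem (s : PySem.Set String) (p : String) (h : p ∈ s) : PySem.Set.add s p = s := by
  simp [PySem.Set.add, PySem.Set.contains, h]

theorem pvFoldAdd (l : List String) : ∀ (s : List String), l.Nodup → (∀ p ∈ l, p ∉ s) →
    l.foldl PySem.Set.add s = s ++ l := by
  induction l with
  | nil => intro s _ _; simp
  | cons p l' ih =>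
    intro s hnd hdis
    have hc : PySem.Set.add s p = s ++ [p] := by
      have : p ∉ s := hdis p (List.mem_cons_self)
      simp [PySem.Set.add, PySem.Set.contains, this]
    rw [List.foldl_cons, hc, ih (s ++ [p]) hnd.of_cons ?_]
    · simp
    · intro q hq
      simp only [List.mem_append, List.mem_singleton]
      rintro (hqs | rfl)
      · exact hdis q (List.mem_cons_of_mem _ hq) hqs
      · exact (List.nodup_cons.mp hnd).1 hq

theorem pvSet_ofList_nodup (l : List String) (h : l.Nodup) : PySem.Set.ofList l = l := by
  rw [PySem.Set.ofList_eq_foldl, pvFoldAdd l [] h (by simp), List.nil_append]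

theorem pvSet_update_self (s : PySem.Set String) (ps : List String) (h : ∀ p ∈ ps, p ∈ s) :
    PySem.Set.update s ps = s := by
  show ps.foldl PySem.Set.add s = s
  induction ps with
  | nil => rfl
  | cons p ps ih =>
    rw [List.foldl_cons, pvSet_add_mem s p (h p List.mem_cons_self)]
    exact ih (fun q hq => h q (List.mem_cons_of_mem _ hq))

-- ---------- popWhile ----------

theorem pvPopWhile_nil (w : String) : pvPopWhile w [] = [] := by
  rw [pvPopWhile]
  rfl

theorem pvPopWhile_concat (w : String) (as : List String) (b : String) :
    pvPopWhile w (as ++ [b]) =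
      if PySem.Str.startswith w b then as ++ [b] else pvPopWhile w as := by
  rw [pvPopWhile]
  have hg : (as ++ [b]).getLast? = some b := List.getLast?_concat
  split
  · next heq => rw [hg] at heq; cases heq
  · next top heq =>
    rw [hg] at heq
    injection heq with heq'
    subst heq'
    rw [List.dropLast_concat]

theorem pvPopWhile_eq_filter (w : String) (stack : List String)
    (hch : List.Pairwise (fun a b => a.toList <+: b.toList) stack) :
    pvPopWhile w stack = stack.filter (fun p => PySem.Str.startswith w p) := by
  revert hch
  induction stack using List.reverseRecOn with
  | nil => intro _; simp [pvPopWhile_nil]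
  | append_singleton as b ih =>
    intro hch
    rw [List.pairwise_append] at hch
    obtain ⟨has, -, hcross⟩ := hch
    rw [pvPopWhile_concat, List.filter_append]
    by_cases hb : PySem.Str.startswith w b = true
    · rw [if_pos hb]
      have hfe : as.filter (fun p => PySem.Str.startswith w p) = as := by
        rw [List.filter_eq_self]
        intro a ha
        exact (pvSW_iff w a).mpr ((hcross a ha b (by simp)).trans ((pvSW_iff w b).mp hb))
      rw [hfe]
      simp only [List.filter_cons, List.filter_nil, hb, if_true]
    · rw [if_neg hb, ih has]
      simp only [List.filter_cons, List.filter_nil, hb, Bool.false_eq_true, if_false, List.append_nil]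

-- ---------- chain position facts ----------

theorem pvChainLt_head (names : List String) (w : String) (rest' : List String)
    (hu : pvU names = w :: rest') : pvChainLt (pvU names) w = [] := by
  have hpw := pvU_pairwise names
  rw [hu] at hpw
  rw [List.pairwise_cons] at hpw
  rw [pvChainLt, hu, List.filter_eq_nil_iff]
  intro p hp heq
  simp only [Bool.and_eq_true, Bool.not_eq_true', beq_eq_false_iff_ne] at heq
  obtain ⟨hsw, hne⟩ := heq
  rcases List.mem_cons.mp hp with rfl | hp'
  · exact hne rfl
  · exact absurd (pvLe_of_prefix p w ((pvSW_iff w p).mp hsw)) (not_le_of_gt (hpw.1 p hp'))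

theorem pvChainLe_eq (names : List String) (pre : List String) (w : String) (rest' : List String)
    (hu : pvU names = pre ++ w :: rest') :
    pvChainLt (pvU names) w ++ [w] = pvChainLe (pvU names) w := by
  have hpw := pvU_pairwise names
  rw [hu, List.pairwise_append] at hpw
  obtain ⟨hpre, htail, hcross⟩ := hpw
  rw [List.pairwise_cons] at htail
  have hrest : ∀ q ∈ rest', ¬ (PySem.Str.startswith w q = true) := by
    intro q hq hswq
    exact absurd (pvLe_of_prefix q w ((pvSW_iff w q).mp hswq)) (not_le_of_gt (htail.1 q hq))
  have hsww : PySem.Str.startswith w w = true := (pvSW_iff w w).mpr (List.prefix_refl _)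
  have h1 : List.filter (fun p => PySem.Str.startswith w p) rest' = [] :=
    List.filter_eq_nil_iff.mpr hrest
  have h2 : List.filter (fun p => PySem.Str.startswith w p && !(p == w)) rest' = [] := by
    rw [List.filter_eq_nil_iff]
    intro q hq heq
    simp only [Bool.and_eq_true] at heq
    exact hrest q hq heq.1
  have h3 : List.filter (fun p => PySem.Str.startswith w p && !(p == w)) pre
      = List.filter (fun p => PySem.Str.startswith w p) pre := by
    apply List.filter_congr
    intro p hp
    have hne : (p == w) = false :=
      beq_eq_false_iff_ne.mpr (ne_of_lt (hcross p hp w List.mem_cons_self))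
    rw [hne]
    simp
  rw [pvChainLt, pvChainLe, hu, List.filter_append, List.filter_append,
    List.filter_cons, List.filter_cons, h1, h2, h3]
  simp only [hsww, beq_self_eq_true, Bool.not_true, Bool.and_false,
    Bool.false_eq_true, if_false, if_true, List.append_nil]

theorem pvPop_main (names : List String) (pre' : List String) (w0 w : String) (rest' : List String)
    (hu : pvU names = (pre' ++ [w0]) ++ w :: rest') :
    pvPopWhile w (pvChainLe (pvU names) w0) = pvChainLt (pvU names) w := by
  have hpw := pvU_pairwise names
  have hstackpw : List.Pairwise (fun a b => a.toList <+: b.toList) (pvChainLe (pvU names) w0) := by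
    apply List.Pairwise.imp_of_mem ?_ (hpw.filter _)
    intro a b ha hb hab
    exact pvPrefix_anti a b w0 ((pvSW_iff _ _).mp (List.mem_filter.mp ha).2)
      ((pvSW_iff _ _).mp (List.mem_filter.mp hb).2) hab
  rw [pvPopWhile_eq_filter w _ hstackpw, pvChainLe, List.filter_filter, pvChainLt]
  apply List.filter_congr
  intro p hp
  rw [hu, List.pairwise_append] at hpw
  obtain ⟨hpre, htail, hcross⟩ := hpw
  rw [List.pairwise_cons] at htail
  have hw0w : w0 < w := hcross w0 (by simp) w List.mem_cons_self
  by_cases hswp : PySem.Str.startswith w p = true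
  · rw [hswp, Bool.true_and, Bool.true_and]
    by_cases hpweq : p = w
    · subst hpweq
      have hns : ¬ (PySem.Str.startswith w0 p = true) := by
        intro hs
        exact absurd (pvLe_of_prefix p w0 ((pvSW_iff _ _).mp hs)) (not_le_of_gt hw0w)
      rw [Bool.eq_false_iff.mpr hns, beq_self_eq_true, Bool.not_true]
    · have hplt : p < w := pvLex_of_prefix_ne p w ((pvSW_iff w p).mp hswp) hpweq
      have hple : p ≤ w0 := by
        rw [hu] at hp
        rcases List.mem_append.mp hp with hl | hr
        · rcases List.mem_append.mp hl with hl' | hl''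
          · rw [List.pairwise_append] at hpre
            exact le_of_lt (hpre.2.2 p hl' w0 (by simp))
          · simp only [List.mem_singleton] at hl''
            exact le_of_eq hl''
        · rcases List.mem_cons.mp hr with rfl | hr'
          · exact absurd rfl hpweq
          · exact absurd hplt (not_lt_of_gt (htail.1 p hr'))
      have : p.toList <+: w0.toList :=
        pvSandwich p w0 w ((pvSW_iff w p).mp hswp) hple (le_of_lt hw0w)
      rw [(pvSW_iff w0 p).mpr this, beq_eq_false_iff_ne.mpr hpweq]
      rfl
  · simp only [Bool.eq_false_iff.mpr hswp, Bool.false_and]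

-- ---------- the stack fold ----------

theorem pvGo (names : List String) (rest : List String) : ∀ (pre : List String) (ch : PVDict),
    pvU names = pre ++ rest →
    (∀ x, ch.get? x = if x ∈ pre ∧ pvChainLt (pvU names) x ≠ []
        then some (pvChainLt (pvU names) x) else none) →
    ∀ x, (rest.foldl pvStepS (ch, pvStackOf (pvU names) pre)).1.get? x =
      if x ∈ pvU names ∧ pvChainLt (pvU names) x ≠ []
        then some (pvChainLt (pvU names) x) else none := by
  induction rest with
  | nil =>
    intro pre ch hu hch x
    have hpre : pre = pvU names := by rw [hu, List.append_nil]
    rw [List.foldl_nil, hch x, hpre]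
  | cons w rest' ih =>
    intro pre ch hu hch x
    have hpop : pvPopWhile w (pvStackOf (pvU names) pre) = pvChainLt (pvU names) w := by
      rcases List.eq_nil_or_concat pre with rfl | ⟨pre', w0, rfl⟩
      · rw [pvStackOf]
        simp only [List.getLast?_nil]
        rw [pvPopWhile_nil, pvChainLt_head names w rest' (by simpa using hu)]
      · rw [pvStackOf, List.concat_eq_append, List.getLast?_concat]
        exact pvPop_main names pre' w0 w rest' (by simpa using hu)
    have hndfilter : (pvChainLt (pvU names) w).Nodup := (pvU_nodup names).filter _
    have hstep : pvStepS (ch, pvStackOf (pvU names) pre) w =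
        ((if (pvChainLt (pvU names) w).isEmpty then ch
          else ch.insert w (pvChainLt (pvU names) w)), pvStackOf (pvU names) (pre ++ [w])) := by
      simp only [pvStepS, hpop, pvSet_ofList_nodup _ hndfilter]
      refine Prod.ext rfl ?_
      show pvChainLt (pvU names) w ++ [w] = pvStackOf (pvU names) (pre ++ [w])
      rw [pvStackOf, List.getLast?_concat]
      exact pvChainLe_eq names pre w rest' hu
    rw [List.foldl_cons, hstep]
    apply ih (pre ++ [w]) _ (by rw [hu, List.append_assoc, List.singleton_append])
    intro y
    by_cases hemp : (pvChainLt (pvU names) w).isEmpty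
    · rw [if_pos hemp, hch y]
      by_cases hyw : y = w
      · subst hyw
        have he : pvChainLt (pvU names) y = [] := List.isEmpty_iff.mp hemp
        rw [if_neg (fun h => h.2 he), if_neg (fun h => h.2 he)]
      · simp [List.mem_append, hyw]
    · rw [if_neg hemp, PySem.Dict.get?_insert]
      by_cases hyw : y = w
      · subst hyw
        rw [if_pos rfl, if_pos ⟨by simp, by simpa using hemp⟩]
      · rw [if_neg hyw, hch y]
        simp [List.mem_append, hyw]

theorem pvChains_get (names : List String) (x : String) :
    (((pvU names).foldl pvStepS (PySem.Dict.empty, [])).1).get? x =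
      if x ∈ pvU names ∧ pvChainLt (pvU names) x ≠ []
        then some (pvChainLt (pvU names) x) else none := by
  have h := pvGo names (pvU names) [] PySem.Dict.empty (by simp)
    (fun y => by rw [PySem.Dict.get?_empty]; simp) x
  exact h

-- ---------- pvAVal facts ----------

theorem pvContains_iff (s : List String) (x : String) : PySem.Set.contains s x = true ↔ x ∈ s := by
  simp [PySem.Set.contains]

theorem pvAVal_mem (names : List String) (n p : String) :
    p ∈ pvAVal names n ↔ p ∈ names ∧ p.toList <+: n.toList ∧ p ≠ n ∧ p ≠ "" := by
  rw [pvAVal, List.mem_filter, List.mem_map]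
  constructor
  · rintro ⟨⟨k, hk, rfl⟩, hc⟩
    rw [PySem.List.mem_pyRange_one] at hk
    obtain ⟨h1, h2⟩ := hk
    rw [PySem.Str.len_eq] at h2
    have htl : (PySem.Str.slice n none (some k)).toList = n.toList.take k.toNat := by
      rw [PySem.Str.toList_slice, PySem.Chars.slice_eq_listSlice,
        PySem.List.slice_to _ (le_trans zero_le_one h1)]
    have hklt : k.toNat < n.toList.length := by omega
    have hlen : (PySem.Str.slice n none (some k)).toList.length = k.toNat := by
      rw [htl, List.length_take]; omega
    refine ⟨(PySem.Set.mem_ofList names _).mp ((pvContains_iff _ _).mp hc), ?_, ?_, ?_⟩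
    · rw [htl]; exact List.take_prefix _ _
    · intro he
      have := congrArg (fun s => s.toList.length) he
      simp only at this
      omega
    · intro he
      have := congrArg (fun s => s.toList.length) he
      simp only [String.toList_empty, List.length_nil] at this
      omega
  · rintro ⟨hmem, hpre, hne, hnemp⟩
    have hlp : 0 < p.toList.length := by
      cases hl : p.toList with
      | nil => exact absurd (String.toList_eq_nil_iff.mp hl) hnemp
      | cons a t => simp
    have hlt : p.toList.length < n.toList.length := by
      rcases lt_or_eq_of_le (List.IsPrefix.length_le hpre) with h | h
      · exact h
      · exact absurd (String.toList_inj.mp (List.IsPrefix.eq_of_length hpre h)) hne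
    refine ⟨⟨(p.toList.length : Int), ?_, ?_⟩, ?_⟩
    · rw [PySem.List.mem_pyRange_one, PySem.Str.len_eq]
      constructor <;> [exact_mod_cast hlp; exact_mod_cast hlt]
    · apply String.toList_inj.mp
      rw [PySem.Str.toList_slice, PySem.Chars.slice_eq_listSlice,
        PySem.List.slice_to _ (by positivity), Int.toNat_natCast]
      exact (List.prefix_iff_eq_take.mp hpre).symm
    · exact (pvContains_iff _ _).mpr ((PySem.Set.mem_ofList names p).mpr hmem)

theorem pvAVal_pairwise (names : List String) (n : String) :
    List.Pairwise (· < ·) (pvAVal names n) := by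
  apply List.Pairwise.filter
  rw [List.pairwise_map]
  have hppw : List.Pairwise (· < ·) (PySem.List.pyRange 1 (PySem.Str.len n)) := by
    rw [PySem.List.pyRange_of_pos 1 (PySem.Str.len n) (by norm_num)]
    rw [List.pairwise_map]
    exact List.pairwise_lt_range.imp (fun h => by omega)
  apply hppw.imp_of_mem
  intro a b ha hb hab
  rw [PySem.List.mem_pyRange_one] at ha hb
  rw [PySem.Str.len_eq] at ha hb
  have htla : (PySem.Str.slice n none (some a)).toList = n.toList.take a.toNat := by
    rw [PySem.Str.toList_slice, PySem.Chars.slice_eq_listSlice,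
      PySem.List.slice_to _ (le_trans zero_le_one ha.1)]
  have htlb : (PySem.Str.slice n none (some b)).toList = n.toList.take b.toNat := by
    rw [PySem.Str.toList_slice, PySem.Chars.slice_eq_listSlice,
      PySem.List.slice_to _ (le_trans zero_le_one hb.1)]
  apply pvLex_of_prefix_ne
  · rw [htla, htlb]
    exact List.take_prefix_take_left (by omega)
  · intro he
    have := congrArg (fun s => s.toList.length) he
    simp only [htla, htlb, List.length_take] at this
    omega

theorem pvAVal_eq_chain (names : List String) (n : String) :
    pvChainLt (pvU names) n = pvAVal names n := by
  have h1 : List.Pairwise (· < ·) (pvChainLt (pvU names) n) := (pvU_pairwise names).filter _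
  have h2 := pvAVal_pairwise names n
  have hmem : ∀ p, p ∈ pvChainLt (pvU names) n ↔ p ∈ pvAVal names n := by
    intro p
    rw [pvChainLt, List.mem_filter, pvAVal_mem]
    simp only [Bool.and_eq_true, Bool.not_eq_true', beq_eq_false_iff_ne, pvSW_iff, pvU_mem]
    tauto
  have hperm : (pvChainLt (pvU names) n).Perm (pvAVal names n) :=
    (List.perm_ext_iff_of_nodup (h1.imp ne_of_lt) (h2.imp ne_of_lt)).mpr hmem
  exact List.Perm.eq_of_pairwise (fun a b _ _ h h' => le_antisymm h h')
    (h1.imp le_of_lt) (h2.imp le_of_lt) hperm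

-- ---------- step characterizations ----------

theorem pvFoldIf (names : List String) (n : String) (ks : List Int) : ∀ (d : PVDict),
    ks.foldl (fun d k =>
      if PySem.Set.contains (PySem.Set.ofList names) (PySem.Str.slice n none (some k)) then
        d.insert n (PySem.Set.add (d.getD n PySem.Set.empty) (PySem.Str.slice n none (some k)))
      else d) d
      = ((ks.map (fun k => PySem.Str.slice n none (some k))).filter
          (fun p => PySem.Set.contains (PySem.Set.ofList names) p)).foldl
          (fun d p => d.insert n (PySem.Set.add (d.getD n PySem.Set.empty) p)) d := by
  induction ks with
  | nil => intro d; rfl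
  | cons k ks ih =>
    intro d
    rw [List.foldl_cons, List.map_cons, List.filter_cons]
    by_cases hc : PySem.Set.contains (PySem.Set.ofList names) (PySem.Str.slice n none (some k)) = true
    · rw [if_pos hc, if_pos hc, List.foldl_cons]
      exact ih _
    · rw [if_neg hc, if_neg hc]
      exact ih d

theorem pvInsertFold (n : String) (ps : List String) : ∀ (d : PVDict),
    ps.foldl (fun d p => d.insert n (PySem.Set.add (d.getD n PySem.Set.empty) p)) d
      = if ps.isEmpty then d
        else d.insert n (PySem.Set.update (d.getD n PySem.Set.empty) ps) := by
  induction ps with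
  | nil => intro d; rfl
  | cons p ps ih =>
    intro d
    rw [List.foldl_cons, ih]
    by_cases he : ps.isEmpty
    · rw [if_pos he, if_neg (by simp)]
      have hps : ps = [] := List.isEmpty_iff.mp he
      subst hps
      rfl
    · rw [if_neg he, if_neg (by simp)]
      rw [PySem.Dict.getD_insert_self, PySem.Dict.insert_insert_self]
      rfl

theorem pvStepA_eq (names : List String) (n : String) (d : PVDict) :
    pvStepA names d n = if (pvAVal names n).isEmpty then d
      else d.insert n (PySem.Set.update (d.getD n PySem.Set.empty) (pvAVal names n)) := by
  rw [pvStepA, pvFoldIf, ← pvAVal, pvInsertFold]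

theorem pvAVal_empty_empty (names : List String) : pvAVal names "" = [] := by
  rw [List.eq_nil_iff_forall_not_mem]
  intro p hp
  rw [pvAVal_mem] at hp
  obtain ⟨-, hpre, -, hne⟩ := hp
  exact hne (String.toList_eq_nil_iff.mp (List.prefix_nil.mp (by simpa using hpre)))

theorem pvMainFold (names : List String) (ms : List String) : ∀ (d : PVDict),
    (∀ n ∈ ms, n ∈ names) →
    (∀ m v, d.get? m = some v → v = pvAVal names m) →
    ms.foldl (pvStepA names) d =
      ms.foldl (pvStepB (((pvU names).foldl pvStepS (PySem.Dict.empty, [])).1)) d := by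
  induction ms with
  | nil => intro d _ _; rfl
  | cons n ms ih =>
    intro d hms hinv
    have hn : n ∈ names := hms n List.mem_cons_self
    have hchn := pvChains_get names n
    rw [pvAVal_eq_chain names n] at hchn
    rw [List.foldl_cons, List.foldl_cons]
    by_cases hemp : (pvAVal names n).isEmpty
    · have hav : pvAVal names n = [] := List.isEmpty_iff.mp hemp
      have hstepA : pvStepA names d n = d := by rw [pvStepA_eq, if_pos hemp]
      have hstepB : pvStepB (((pvU names).foldl pvStepS (PySem.Dict.empty, [])).1) d n = d := by
        rw [pvStepB, hchn, if_neg (fun h => h.2 hav)]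
      rw [hstepA, hstepB]
      exact ih d (fun q hq => hms q (List.mem_cons_of_mem _ hq)) hinv
    · have hav : pvAVal names n ≠ [] := fun h => hemp (by rw [h]; rfl)
      have hne'' : n ≠ "" := by
        rintro rfl
        exact hav (pvAVal_empty_empty names)
      have hv : PySem.Set.update (d.getD n PySem.Set.empty) (pvAVal names n) = pvAVal names n := by
        cases hget : d.get? n with
        | some v =>
          rw [PySem.Dict.getD_of_get?_eq_some _ _ hget, hinv n v hget]
          exact pvSet_update_self _ _ (fun p hp => hp)
        | none =>
          have hcf : d.contains n = false := by
            rw [PySem.Dict.contains_eq_isSome_get?, hget]; rfl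
          rw [PySem.Dict.getD_of_not_contains _ _ hcf]
          show PySem.Set.update [] (pvAVal names n) = pvAVal names n
          rw [show PySem.Set.update [] (pvAVal names n) = PySem.Set.ofList (pvAVal names n) from
            (PySem.Set.ofList_eq_foldl _).symm]
          exact pvSet_ofList_nodup _ ((pvAVal_pairwise names n).imp ne_of_lt)
      have hstepA : pvStepA names d n = d.insert n (pvAVal names n) := by
        rw [pvStepA_eq, if_neg hemp, hv]
      have hstepB : pvStepB (((pvU names).foldl pvStepS (PySem.Dict.empty, [])).1) d n
          = d.insert n (pvAVal names n) := by
        rw [pvStepB, hchn, if_pos ⟨(pvU_mem names n).mpr ⟨hn, hne''⟩, hav⟩]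
      rw [hstepA, hstepB]
      apply ih _ (fun q hq => hms q (List.mem_cons_of_mem _ hq))
      intro m v hget
      rw [PySem.Dict.get?_insert] at hget
      by_cases hmn : m = n
      · rw [if_pos hmn] at hget
        injection hget with hg
        rw [← hg, hmn]
      · rw [if_neg hmn] at hget
        exact hinv m v hget

-- ===== VERDICT (by name: the statement is the Claim_ definition above) =====
theorem build_prefix_map_spec : Claim_equal_build_prefix_map := by
  intro names _
  show build_prefix_map names = build_prefix_map_alt names
  show (names.foldl (pvStepA names) PySem.Dict.empty).items =
    (names.foldl (pvStepB (((pvU names).foldl pvStepS (PySem.Dict.empty, [])).1)) PySem.Dict.empty).items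
  exact congrArg PySem.Dict.items
    (pvMainFold names names PySem.Dict.empty (fun _ h => h)
      (fun m v hv => by rw [PySem.Dict.get?_empty] at hv; cases hv))
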